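-- pv_equiv track=rewrite | github.com/TrueCyan/unityflow | src/prefab_tool/script_parser.py | reorder_fields
-- ===== SOURCE A (Python) =====
-- def reorder_fields(
--     fields: dict[str, any],
--     field_order: list[str],
--     unity_fields_first: bool = True,
-- ) -> dict[str, any]:
--     """Reorder dictionary fields according to the script field order.
--
--     Args:
--         fields: Dictionary of field name -> value
--         field_order: List of field names in desired order
--         unity_fields_first: If True, keep Unity standard fields first
--
--     Returns:
--         New dictionary with reordered fields
--     """
--     # Unity standard fields that should always come first
--     UNITY_STANDARD_FIELDS = [
--         "m_ObjectHideFlags",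
--         "m_CorrespondingSourceObject",
--         "m_PrefabInstance",
--         "m_PrefabAsset",
--         "m_GameObject",
--         "m_Enabled",
--         "m_EditorHideFlags",
--         "m_Script",
--         "m_Name",
--         "m_EditorClassIdentifier",
--     ]
--
--     result = {}
--
--     # Add Unity standard fields first (if present)
--     if unity_fields_first:
--         for key in UNITY_STANDARD_FIELDS:
--             if key in fields:
--                 result[key] = fields[key]
--
--     # Add fields in script order
--     for key in field_order:
--         if key in fields and key not in result:
--             result[key] = fields[key]
--
--     # Add any remaining fields (not in order list)
--     for key in fields:
--         if key not in result:
--             result[key] = fields[key]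
--
--     return result
-- ===== SOURCE B (Python) =====
-- def reorder_fields(
--     fields: dict[str, any],
--     field_order: list[str],
--     unity_fields_first: bool = True,
-- ) -> dict[str, any]:
--     """Reorder fields by assigning each key a numeric priority and doing one stable sort."""
--     UNITY_STANDARD_FIELDS = [
--         "m_ObjectHideFlags",
--         "m_CorrespondingSourceObject",
--         "m_PrefabInstance",
--         "m_PrefabAsset",
--         "m_GameObject",
--         "m_Enabled",
--         "m_EditorHideFlags",
--         "m_Script",
--         "m_Name",
--         "m_EditorClassIdentifier",
--     ]
--     keys = list(fields)
--     nu = len(UNITY_STANDARD_FIELDS)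
--     no = len(field_order)
--     upos = _first_index(UNITY_STANDARD_FIELDS)
--     opos = _first_index(field_order)
--     kpos = _first_index(keys)
--
--     def rank(key):
--         if unity_fields_first and key in upos:
--             return upos[key]
--         if key in opos:
--             return nu + opos[key]
--         return nu + no + kpos[key]
--
--     return {key: fields[key] for key in sorted(keys, key=rank)}
--
--
-- def _first_index(lst):
--     """Map each element to the index of its first occurrence."""
--     pos = {}
--     for i, key in enumerate(lst):
--         if key not in pos:
--             pos[key] = i
--     return pos
-- ===== Notes on version B (the rewrite author's own statement) =====
-- stated objective: alternative
-- what changed: B replaces A's three sequential result-dict-building passes (each probing 'key not in result') by precomputing first-occurrence index dicts, assigning every key a single numeric priority (Unity slot, script-order slot, or original position) and emitting the keys with one stable sort.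
import Mathlib
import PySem

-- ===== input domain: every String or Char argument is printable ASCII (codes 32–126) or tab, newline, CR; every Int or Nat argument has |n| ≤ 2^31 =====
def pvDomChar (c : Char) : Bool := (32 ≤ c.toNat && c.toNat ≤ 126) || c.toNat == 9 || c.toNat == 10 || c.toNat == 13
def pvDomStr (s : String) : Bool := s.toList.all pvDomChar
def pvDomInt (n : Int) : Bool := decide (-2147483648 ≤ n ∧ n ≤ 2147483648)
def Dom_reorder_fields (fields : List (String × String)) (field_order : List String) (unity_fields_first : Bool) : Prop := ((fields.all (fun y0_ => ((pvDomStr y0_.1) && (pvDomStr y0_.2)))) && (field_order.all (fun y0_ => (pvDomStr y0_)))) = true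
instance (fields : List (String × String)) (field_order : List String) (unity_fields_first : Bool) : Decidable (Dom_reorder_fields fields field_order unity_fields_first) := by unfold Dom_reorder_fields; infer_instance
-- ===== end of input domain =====

-- B replaces A's three result-dict-building passes (with `key not in result` probing) by one numeric
-- priority function and a single stable sort of the keys; objective: alternative (same cost class).

-- ===== PORT A =====
-- the UNITY_STANDARD_FIELDS constant both Python versions spell out
def pvUnityFields : List String :=
  ["m_ObjectHideFlags", "m_CorrespondingSourceObject", "m_PrefabInstance", "m_PrefabAsset",
   "m_GameObject", "m_Enabled", "m_EditorHideFlags", "m_Script", "m_Name", "m_EditorClassIdentifier"]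

def reorder_fields (fields : List (String × String)) (field_order : List String) (unity_fields_first : Bool) : List (String × String) :=
  let d : PySem.Dict String String := PySem.Dict.mk fields
  let r0 : PySem.Dict String String := PySem.Dict.empty
  -- Add Unity standard fields first (if present)
  let r1 := if unity_fields_first then
      pvUnityFields.foldl (fun r k => if d.contains k then r.insert k (d.getD k "") else r) r0
    else r0
  -- Add fields in script order
  let r2 := field_order.foldl (fun r k => if d.contains k && !(r.contains k) then r.insert k (d.getD k "") else r) r1
  -- Add any remaining fields
  let r3 := d.keys.foldl (fun r k => if !(r.contains k) then r.insert k (d.getD k "") else r) r2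
  r3.items

-- ===== PORT B =====
-- Source B's _first_index helper: first-occurrence index of every element
def pvFirstIndex (lst : List String) : PySem.Dict String Int :=
  (PySem.List.enumerate lst).foldl (fun pos p => if pos.contains p.2 then pos else pos.insert p.2 p.1) PySem.Dict.empty

-- Source B's inner `rank` function (a closure over the precomputed position dicts);
-- kpos[key] is only ever looked up for keys of fields, so the getD default is never the result
def pvRankB (fields : List (String × String)) (field_order : List String) (unity_fields_first : Bool) (key : String) : Int :=
  let keys := fields.map Prod.fst
  let nu : Int := (pvUnityFields.length : Int)
  let no : Int := (field_order.length : Int)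
  let upos := pvFirstIndex pvUnityFields
  let opos := pvFirstIndex field_order
  let kpos := pvFirstIndex keys
  if unity_fields_first && upos.contains key then
    upos.getD key 0
  else if opos.contains key then
    nu + opos.getD key 0
  else
    nu + no + (kpos.get? key).getD 0

def reorder_fields_alt (fields : List (String × String)) (field_order : List String) (unity_fields_first : Bool) : List (String × String) :=
  let d : PySem.Dict String String := PySem.Dict.mk fields
  let keys := fields.map Prod.fst
  let skeys := PySem.List.sorted keys (pvRankB fields field_order unity_fields_first)
  (skeys.foldl (fun r key => r.insert key (d.getD key "")) PySem.Dict.empty).items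

-- ===== PRECONDITION & SPEC =====
-- `fields` is a Python dict: its association list cannot carry two entries with the same key, so
-- Pre_ restricts to distinct keys (no Python call site can produce a duplicate-key input).
def Pre_reorder_fields (fields : List (String × String)) (field_order : List String) (unity_fields_first : Bool) : Prop :=
  (fields.map Prod.fst).Nodup
instance (fields : List (String × String)) (field_order : List String) (unity_fields_first : Bool) : Decidable (Pre_reorder_fields fields field_order unity_fields_first) := by unfold Pre_reorder_fields; infer_instance

def pvWitness_reorder_fields : (List (String × String)) × List String × Bool :=
  ([("m_Script", "s"), ("hp", "3"), ("m_Name", "n"), ("speed", "1")], ["speed", "hp"], true)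

def Spec_reorder_fields (fields : List (String × String)) (field_order : List String) (unity_fields_first : Bool) (out : List (String × String)) : Prop := out = reorder_fields_alt fields field_order unity_fields_first
instance (fields : List (String × String)) (field_order : List String) (unity_fields_first : Bool) (out : List (String × String)) : Decidable (Spec_reorder_fields fields field_order unity_fields_first out) := by unfold Spec_reorder_fields; infer_instance

-- ===== CLAIM (what is proved, stated in full; the proofs are below) =====
def Claim_equal_reorder_fields : Prop := ∀ (fields : List (String × String)) (field_order : List String) (unity_fields_first : Bool), Dom_reorder_fields fields field_order unity_fields_first → Pre_reorder_fields fields field_order unity_fields_first → Spec_reorder_fields fields field_order unity_fields_first (reorder_fields fields field_order unity_fields_first)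

-- ===== LEMMAS AND PROOFS =====

-- the dict whose items are exactly the keys `a`, each paired with its value from `fields`
def pvMkD (f : List (String × String)) (a : List String) : PySem.Dict String String :=
  PySem.Dict.mk (a.map (fun k => (k, (PySem.Dict.mk f).getD k "")))
-- the pure-list model of one "insert k unless already present (and guard P)" step
def pvKeyStep (P : String → Bool) (a : List String) (k : String) : List String :=
  if P k && !(a.contains k) then a ++ [k] else a
-- the keys a guarded pass appends to accumulator `a` while scanning l
def pvNewOf (P : String → Bool) (a : List String) : List String → List String
  | [] => []
  | k :: l => if P k && !(a.contains k) then k :: pvNewOf P (a ++ [k]) l else pvNewOf P a l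

theorem pvContains_mk (f : List (String × String)) (k : String) :
    (PySem.Dict.mk f).contains k = (f.map Prod.fst).contains k := by
  rw [Bool.eq_iff_iff]
  constructor
  · intro h
    simp only [PySem.Dict.contains, List.any_eq_true] at h
    obtain ⟨p, hp, he⟩ := h
    simp only [beq_iff_eq] at he
    subst he
    simp only [List.contains_eq_mem, decide_eq_true_eq, List.mem_map]
    exact ⟨p, hp, rfl⟩
  · intro h
    simp only [List.contains_eq_mem, decide_eq_true_eq, List.mem_map] at h
    obtain ⟨p, hp, he⟩ := h
    simp only [PySem.Dict.contains, List.any_eq_true]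
    exact ⟨p, hp, by simp [he]⟩

theorem pvMkD_contains (f : List (String × String)) (a : List String) (k : String) :
    (pvMkD f a).contains k = a.contains k := by
  rw [Bool.eq_iff_iff]
  constructor
  · intro h
    simp only [pvMkD, PySem.Dict.contains, List.any_eq_true, List.mem_map] at h
    obtain ⟨p, ⟨x, hx, rfl⟩, hp⟩ := h
    simp only [beq_iff_eq] at hp
    subst hp
    simpa [List.contains_eq_mem] using hx
  · intro h
    simp only [List.contains_eq_mem, decide_eq_true_eq] at h
    simp only [pvMkD, PySem.Dict.contains, List.any_eq_true, List.mem_map]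
    exact ⟨(k, (PySem.Dict.mk f).getD k ""), ⟨k, h, rfl⟩, by simp⟩

theorem pvInsert_fresh (f : List (String × String)) (a : List String) (k : String)
    (h : a.contains k = false) :
    (pvMkD f a).insert k ((PySem.Dict.mk f).getD k "") = pvMkD f (a ++ [k]) := by
  have hc : (pvMkD f a).contains k = false := by rw [pvMkD_contains]; exact h
  simp only [PySem.Dict.insert, hc, Bool.false_eq_true, if_false]
  simp [pvMkD]

theorem pvInsert_old (f : List (String × String)) (a : List String) (k : String)
    (h : a.contains k = true) :
    (pvMkD f a).insert k ((PySem.Dict.mk f).getD k "") = pvMkD f a := by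
  have hc : (pvMkD f a).contains k = true := by rw [pvMkD_contains]; exact h
  simp only [PySem.Dict.insert, hc, if_true]
  simp only [pvMkD]
  congr 1
  rw [List.map_map]
  apply List.map_congr_left
  intro x hx
  by_cases hxk : x = k
  · subst hxk; simp
  · simp [Function.comp_def, hxk]

theorem pvStep_sim (f : List (String × String)) (P : String → Bool) (a : List String) (k : String) :
    (if P k then (pvMkD f a).insert k ((PySem.Dict.mk f).getD k "") else pvMkD f a)
      = pvMkD f (pvKeyStep P a k) := by
  unfold pvKeyStep
  by_cases hP : P k
  · cases hc : a.contains k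
    · simp [hP, hc, pvInsert_fresh f a k hc]
    · simp [hP, hc, pvInsert_old f a k hc]
  · simp [hP]

theorem pvPass1_sim (f : List (String × String)) (l a : List String) :
    l.foldl (fun r k => if (PySem.Dict.mk f).contains k then r.insert k ((PySem.Dict.mk f).getD k "") else r) (pvMkD f a)
      = pvMkD f (l.foldl (pvKeyStep (fun k => (PySem.Dict.mk f).contains k)) a) := by
  induction l generalizing a with
  | nil => rfl
  | cons k l ih =>
    simp only [List.foldl_cons]
    rw [pvStep_sim f (fun k => (PySem.Dict.mk f).contains k) a k, ih]

theorem pvPass2_sim (f : List (String × String)) (l a : List String) :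
    l.foldl (fun r k => if (PySem.Dict.mk f).contains k && !(r.contains k) then r.insert k ((PySem.Dict.mk f).getD k "") else r) (pvMkD f a)
      = pvMkD f (l.foldl (pvKeyStep (fun k => (PySem.Dict.mk f).contains k)) a) := by
  induction l generalizing a with
  | nil => rfl
  | cons k l ih =>
    simp only [List.foldl_cons]
    have hstep : (if (PySem.Dict.mk f).contains k && !((pvMkD f a).contains k) then (pvMkD f a).insert k ((PySem.Dict.mk f).getD k "") else pvMkD f a)
        = pvMkD f (pvKeyStep (fun k => (PySem.Dict.mk f).contains k) a k) := by
      unfold pvKeyStep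
      simp only []
      rw [pvMkD_contains]
      by_cases hg : ((PySem.Dict.mk f).contains k && !(a.contains k)) = true
      · have hc : a.contains k = false := by
          rcases Bool.and_eq_true_iff.mp hg with ⟨_, h2⟩
          simpa using h2
        rw [if_pos hg, if_pos hg, pvInsert_fresh f a k hc]
      · rw [if_neg hg, if_neg hg]
    rw [hstep, ih]

theorem pvPass3_sim (f : List (String × String)) (l a : List String) :
    l.foldl (fun r k => if !(r.contains k) then r.insert k ((PySem.Dict.mk f).getD k "") else r) (pvMkD f a)
      = pvMkD f (l.foldl (pvKeyStep (fun _ => true)) a) := by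
  induction l generalizing a with
  | nil => rfl
  | cons k l ih =>
    simp only [List.foldl_cons]
    have hstep : (if !((pvMkD f a).contains k) then (pvMkD f a).insert k ((PySem.Dict.mk f).getD k "") else pvMkD f a)
        = pvMkD f (pvKeyStep (fun _ => true) a k) := by
      unfold pvKeyStep
      rw [pvMkD_contains]
      cases hc : a.contains k
      · simp [pvInsert_fresh f a k hc]
      · simp
    rw [hstep, ih]

theorem pvPassB_sim (f : List (String × String)) (l a : List String) :
    l.foldl (fun r k => r.insert k ((PySem.Dict.mk f).getD k "")) (pvMkD f a)
      = pvMkD f (l.foldl (pvKeyStep (fun _ => true)) a) := by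
  induction l generalizing a with
  | nil => rfl
  | cons k l ih =>
    simp only [List.foldl_cons]
    have hstep : (pvMkD f a).insert k ((PySem.Dict.mk f).getD k "")
        = pvMkD f (pvKeyStep (fun _ => true) a k) := by
      unfold pvKeyStep
      cases hc : a.contains k
      · simp [pvInsert_fresh f a k hc]
      · simp [pvInsert_old f a k hc]
    rw [hstep, ih]

theorem pvFoldl_keyStep (P : String → Bool) (l a : List String) :
    l.foldl (pvKeyStep P) a = a ++ pvNewOf P a l := by
  induction l generalizing a with
  | nil => simp [pvNewOf]
  | cons k l ih =>
    simp only [List.foldl_cons, pvNewOf]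
    by_cases hg : (P k && !(a.contains k)) = true
    · have h1 : pvKeyStep P a k = a ++ [k] := by unfold pvKeyStep; rw [if_pos hg]
      rw [h1, ih, if_pos hg]
      simp
    · have h1 : pvKeyStep P a k = a := by unfold pvKeyStep; rw [if_neg hg]
      rw [h1, ih, if_neg hg]

theorem pvMem_newOf (P : String → Bool) (l : List String) : ∀ (a : List String) (k : String),
    k ∈ pvNewOf P a l → k ∈ l ∧ P k = true ∧ a.contains k = false := by
  induction l with
  | nil => intro a k h; simp [pvNewOf] at h
  | cons x t ih =>
    intro a k h
    simp only [pvNewOf] at h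
    by_cases hg : (P x && !(a.contains x)) = true
    · rw [if_pos hg] at h
      rcases Bool.and_eq_true_iff.mp hg with ⟨hPx, hcx⟩
      cases h with
      | head => exact ⟨List.mem_cons_self, hPx, by simpa using hcx⟩
      | tail _ h =>
        obtain ⟨h1, h2, h3⟩ := ih (a ++ [x]) k h
        refine ⟨List.mem_cons_of_mem _ h1, h2, ?_⟩
        simp only [List.contains_eq_mem, List.mem_append] at h3 ⊢
        simp only [decide_eq_false_iff_not, not_or] at h3
        simpa using h3.1
    · rw [if_neg hg] at h
      obtain ⟨h1, h2, h3⟩ := ih a k h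
      exact ⟨List.mem_cons_of_mem _ h1, h2, h3⟩

theorem pvMem_newOf_of (P : String → Bool) (l : List String) : ∀ (a : List String) (k : String),
    k ∈ l → P k = true → a.contains k = false → k ∈ pvNewOf P a l := by
  induction l with
  | nil => intro a k h; cases h
  | cons x t ih =>
    intro a k hl hP ha
    simp only [pvNewOf]
    by_cases hg : (P x && !(a.contains x)) = true
    · rw [if_pos hg]
      by_cases hk : k = x
      · subst hk; exact List.mem_cons_self
      · have ht : k ∈ t := by cases hl with | head => exact absurd rfl hk | tail _ h => exact h
        refine List.mem_cons_of_mem _ (ih (a ++ [x]) k ht hP ?_)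
        simp only [List.contains_eq_mem, List.mem_append, decide_eq_false_iff_not, not_or]
        constructor
        · simpa [List.contains_eq_mem] using ha
        · simp [hk]
    · rw [if_neg hg]
      have hk : k ≠ x := by
        intro he; subst he
        refine hg (by rw [hP, ha]; rfl)
      have ht : k ∈ t := by cases hl with | head => exact absurd rfl hk | tail _ h => exact h
      exact ih a k ht hP ha

theorem pvNodup_newOf (P : String → Bool) (l : List String) : ∀ (a : List String), a.Nodup →
    (a ++ pvNewOf P a l).Nodup := by
  induction l with
  | nil => intro a ha; simpa [pvNewOf] using ha
  | cons x t ih =>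
    intro a ha
    simp only [pvNewOf]
    by_cases hg : (P x && !(a.contains x)) = true
    · rw [if_pos hg]
      have hx : x ∉ a := by
        rcases Bool.and_eq_true_iff.mp hg with ⟨_, h2⟩
        simpa [List.contains_eq_mem] using h2
      have hax : (a ++ [x]).Nodup := by
        rw [List.nodup_append]
        refine ⟨ha, List.nodup_singleton x, ?_⟩
        intro y hy z hz
        rw [List.mem_singleton] at hz
        subst hz
        intro he
        exact hx (he ▸ hy)
      have := ih (a ++ [x]) hax
      simpa [List.append_assoc] using this
    · rw [if_neg hg]; exact ih a ha

theorem pvPairwise_newOf (P : String → Bool) (l : List String) : ∀ (a : List String),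
    (pvNewOf P a l).Pairwise (fun x y => List.idxOf x l < List.idxOf y l) := by
  induction l with
  | nil => intro a; simp [pvNewOf]
  | cons x t ih =>
    intro a
    have hlift : ∀ (b : List String), (∀ y ∈ pvNewOf P b t, y ≠ x) →
        (pvNewOf P b t).Pairwise (fun p q => List.idxOf p (x :: t) < List.idxOf q (x :: t)) := by
      intro b hb
      refine (ih b).imp_of_mem ?_
      intro p q hp hq hlt
      rw [List.idxOf_cons, List.idxOf_cons]
      have hxp : (x == p) = false := by simpa using Ne.symm (hb p hp)
      have hxq : (x == q) = false := by simpa using Ne.symm (hb q hq)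
      simp only [hxp, hxq, cond_false]
      omega
    simp only [pvNewOf]
    by_cases hg : (P x && !(a.contains x)) = true
    · rw [if_pos hg]
      refine List.Pairwise.cons ?_ ?_
      · intro y hy
        have hyx : y ≠ x := by
          have h3 := (pvMem_newOf P t (a ++ [x]) y hy).2.2
          simp only [List.contains_eq_mem, List.mem_append, decide_eq_false_iff_not, not_or] at h3
          simpa using h3.2
        rw [List.idxOf_cons, List.idxOf_cons]
        have hxy : (x == y) = false := by simpa using Ne.symm hyx
        simp only [hxy, cond_false, beq_self_eq_true, cond_true]
        omega
      · refine hlift (a ++ [x]) ?_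
        intro y hy
        have h3 := (pvMem_newOf P t (a ++ [x]) y hy).2.2
        simp only [List.contains_eq_mem, List.mem_append, decide_eq_false_iff_not, not_or] at h3
        simpa using h3.2
    · rw [if_neg hg]
      refine hlift a ?_
      intro y hy
      obtain ⟨_, hPy, hcy⟩ := pvMem_newOf P t a y hy
      intro he; subst he
      exact hg (by rw [hPy, hcy]; rfl)

theorem pvNewOf_true_all (l : List String) : ∀ (a : List String), l.Nodup →
    (∀ k ∈ l, a.contains k = false) → pvNewOf (fun _ => true) a l = l := by
  induction l with
  | nil => intro a _ _; rfl
  | cons x t ih =>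
    intro a hnd h
    have hx : a.contains x = false := h x List.mem_cons_self
    have hg : ((fun (_ : String) => true) x && !(a.contains x)) = true := by rw [hx]; rfl
    simp only [pvNewOf]
    rw [if_pos hg]
    congr 1
    refine ih (a ++ [x]) hnd.of_cons ?_
    intro k hk
    have hka : a.contains k = false := h k (List.mem_cons_of_mem _ hk)
    have hkx : k ≠ x := by
      intro he; subst he; exact (List.nodup_cons.mp hnd).1 hk
    simp only [List.contains_eq_mem, List.mem_append, decide_eq_false_iff_not, not_or]
    exact ⟨by simpa [List.contains_eq_mem] using hka, by simpa using hkx⟩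

theorem pvContains_false_iff (a : List String) (k : String) :
    a.contains k = false ↔ k ∉ a := by
  simp [List.contains_eq_mem]

theorem pvFI_get? (l : List String) (k : String) : ∀ (s : Int) (d0 : PySem.Dict String Int),
    ((PySem.List.enumerate l s).foldl (fun pos p => if pos.contains p.2 then pos else pos.insert p.2 p.1) d0).get? k
      = if d0.contains k = true then d0.get? k
        else if k ∈ l then some (s + (List.idxOf k l : Int)) else none := by
  induction l with
  | nil =>
    intro s d0
    cases hc : d0.contains k
    · rw [if_neg Bool.false_ne_true]
      simp [PySem.List.enumerate, (PySem.Dict.get?_eq_none_iff_contains d0 k).mpr hc]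
    · rw [if_pos rfl]
      simp [PySem.List.enumerate]
  | cons x t ih =>
    intro s d0
    rw [PySem.List.enumerate_cons, List.foldl_cons]
    have hmemne : k ∉ t → k ≠ x → k ∉ x :: t := by
      intro hkt hkx hm
      rcases List.mem_cons.mp hm with h | h
      · exact hkx h
      · exact hkt h
    have hidx : k ∈ t → k ≠ x → (s + (List.idxOf k (x :: t) : Int)) = ((s + 1) + (List.idxOf k t : Int)) := by
      intro _ hkx
      rw [List.idxOf_cons]
      have hxk : (x == k) = false := by simpa using fun he => hkx he.symm
      rw [hxk]
      simp only [cond_false]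
      push_cast
      ring
    cases hdx : d0.contains x
    · rw [if_neg Bool.false_ne_true, ih]
      by_cases hkx : k = x
      · subst hkx
        rw [if_pos (by rw [PySem.Dict.contains_insert]; simp)]
        rw [PySem.Dict.get?_insert_self, if_neg (by rw [hdx]; exact Bool.false_ne_true),
          if_pos List.mem_cons_self, List.idxOf_cons]
        simp
      · have hci : (d0.insert x s).contains k = d0.contains k := by
          rw [PySem.Dict.contains_insert]
          have hbe : (k == x) = false := by simpa using hkx
          rw [hbe, Bool.false_or]
        rw [hci]
        cases hc : d0.contains k
        · rw [if_neg Bool.false_ne_true,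
            if_neg Bool.false_ne_true]
          by_cases hkt : k ∈ t
          · rw [if_pos (List.mem_cons_of_mem _ hkt), if_pos hkt, hidx hkt hkx]
          · rw [if_neg hkt, if_neg (hmemne hkt hkx)]
        · rw [if_pos rfl, if_pos rfl]
          exact PySem.Dict.get?_insert_of_ne d0 s hkx
    · rw [if_pos rfl, ih]
      cases hc : d0.contains k
      · have hkx : k ≠ x := by
          intro he
          rw [he, hdx] at hc
          cases hc
        rw [if_neg Bool.false_ne_true,
          if_neg Bool.false_ne_true]
        by_cases hkt : k ∈ t
        · rw [if_pos (List.mem_cons_of_mem _ hkt), if_pos hkt, hidx hkt hkx]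
        · rw [if_neg hkt, if_neg (hmemne hkt hkx)]
      · rw [if_pos rfl, if_pos rfl]

theorem pvFirstIndex_get? (l : List String) (k : String) :
    (pvFirstIndex l).get? k = if k ∈ l then some ((List.idxOf k l : Int)) else none := by
  unfold pvFirstIndex
  rw [pvFI_get?]
  rw [if_neg (by rw [PySem.Dict.contains_empty]; exact Bool.false_ne_true)]
  by_cases h : k ∈ l
  · rw [if_pos h, if_pos h]
    congr 1
    ring
  · rw [if_neg h, if_neg h]

theorem pvFirstIndex_contains (l : List String) (k : String) :
    (pvFirstIndex l).contains k = decide (k ∈ l) := by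
  rw [PySem.Dict.contains_eq_isSome_get?, pvFirstIndex_get?]
  by_cases h : k ∈ l
  · simp [h]
  · simp [h]

theorem pvRankB_eq1 (f : List (String × String)) (fo : List String) (k : String)
    (h : k ∈ pvUnityFields) :
    pvRankB f fo true k = (List.idxOf k pvUnityFields : Int) := by
  unfold pvRankB
  have hc : (pvFirstIndex pvUnityFields).contains k = true := by
    rw [pvFirstIndex_contains]
    simpa using h
  rw [if_pos (by rw [hc]; rfl)]
  rw [PySem.Dict.getD_eq_get?_getD, pvFirstIndex_get?, if_pos h]
  rfl

theorem pvRankB_eq2 (f : List (String × String)) (fo : List String) (uff : Bool) (k : String)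
    (h1 : ¬(uff = true ∧ k ∈ pvUnityFields)) (h2 : k ∈ fo) :
    pvRankB f fo uff k = (pvUnityFields.length : Int) + (List.idxOf k fo : Int) := by
  unfold pvRankB
  have hcond : (uff && (pvFirstIndex pvUnityFields).contains k) = false := by
    cases uff
    · rfl
    · have hnm : k ∉ pvUnityFields := fun hm => h1 ⟨rfl, hm⟩
      rw [pvFirstIndex_contains]
      simpa using hnm
  rw [if_neg (by rw [hcond]; exact Bool.false_ne_true)]
  have hc2 : (pvFirstIndex fo).contains k = true := by
    rw [pvFirstIndex_contains]
    simpa using h2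
  rw [if_pos hc2]
  rw [PySem.Dict.getD_eq_get?_getD, pvFirstIndex_get?, if_pos h2]
  rfl

theorem pvRankB_eq3 (f : List (String × String)) (fo : List String) (uff : Bool) (k : String)
    (h1 : ¬(uff = true ∧ k ∈ pvUnityFields)) (h2 : k ∉ fo) (h3 : k ∈ f.map Prod.fst) :
    pvRankB f fo uff k = (pvUnityFields.length : Int) + (fo.length : Int) + (List.idxOf k (f.map Prod.fst) : Int) := by
  unfold pvRankB
  have hcond : (uff && (pvFirstIndex pvUnityFields).contains k) = false := by
    cases uff
    · rfl
    · have hnm : k ∉ pvUnityFields := fun hm => h1 ⟨rfl, hm⟩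
      rw [pvFirstIndex_contains]
      simpa using hnm
  rw [if_neg (by rw [hcond]; exact Bool.false_ne_true)]
  have hc2 : (pvFirstIndex fo).contains k = false := by
    rw [pvFirstIndex_contains]
    simpa using h2
  rw [if_neg (by rw [hc2]; exact Bool.false_ne_true)]
  rw [pvFirstIndex_get?, if_pos h3]
  rfl

-- ===== VERDICT (by name: the statement is the Claim_ definition above) =====
theorem reorder_fields_spec : Claim_equal_reorder_fields := by
  intro fields fo uff _hdom hpre
  show reorder_fields fields fo uff = reorder_fields_alt fields fo uff
  have hn : (fields.map Prod.fst).Nodup := hpre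
  unfold reorder_fields reorder_fields_alt
  simp only []
  rw [show (PySem.Dict.empty : PySem.Dict String String) = pvMkD fields [] from rfl]
  rw [show (PySem.Dict.mk fields).keys = fields.map Prod.fst from rfl]
  have hPd : ∀ k, (PySem.Dict.mk fields).contains k = true ↔ k ∈ fields.map Prod.fst := by
    intro k
    rw [pvContains_mk]
    simp [List.contains_eq_mem]
  have hr1 : (if uff = true then
        pvUnityFields.foldl (fun r k => if (PySem.Dict.mk fields).contains k then r.insert k ((PySem.Dict.mk fields).getD k "") else r) (pvMkD fields [])
      else pvMkD fields [])
      = pvMkD fields (if uff = true then pvNewOf (fun k => (PySem.Dict.mk fields).contains k) [] pvUnityFields else []) := by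
    cases uff
    · rfl
    · rw [if_pos rfl, if_pos rfl]
      rw [pvPass1_sim, pvFoldl_keyStep, List.nil_append]
  rw [hr1, pvPass2_sim, pvPass3_sim, pvPassB_sim]
  rw [pvFoldl_keyStep, pvFoldl_keyStep, pvFoldl_keyStep]
  set Pd : String → Bool := fun k => (PySem.Dict.mk fields).contains k with hPddef
  set ks : List String := fields.map Prod.fst with hksdef
  set u' : List String := if uff = true then pvNewOf Pd [] pvUnityFields else [] with hu'def
  set o' : List String := pvNewOf Pd u' fo with ho'def
  set r' : List String := pvNewOf (fun _ => true) (u' ++ o') ks with hr'def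
  have hu'mem : ∀ k ∈ u', k ∈ pvUnityFields ∧ Pd k = true ∧ uff = true := by
    intro k hk
    rw [hu'def] at hk
    cases uff
    · simp at hk
    · obtain ⟨h1, h2, _⟩ := pvMem_newOf Pd pvUnityFields [] k (by simpa using hk)
      exact ⟨h1, h2, rfl⟩
  have hu'of : ∀ k, uff = true → k ∈ pvUnityFields → Pd k = true → k ∈ u' := by
    intro k hff hkU hPk
    rw [hu'def, hff]
    simpa using pvMem_newOf_of Pd pvUnityFields [] k hkU hPk rfl
  have hu'nd : u'.Nodup := by
    rw [hu'def]
    cases uff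
    · simp
    · simpa using pvNodup_newOf Pd pvUnityFields [] List.nodup_nil
  have hu'pair : u'.Pairwise (fun x y => List.idxOf x pvUnityFields < List.idxOf y pvUnityFields) := by
    rw [hu'def]
    cases uff
    · simp
    · simpa using pvPairwise_newOf Pd pvUnityFields []
  have ho'mem : ∀ k ∈ o', k ∈ fo ∧ Pd k = true ∧ k ∉ u' := by
    intro k hk
    obtain ⟨h1, h2, h3⟩ := pvMem_newOf Pd fo u' k hk
    exact ⟨h1, h2, (pvContains_false_iff u' k).mp h3⟩
  have ho'notU : ∀ k ∈ o', ¬(uff = true ∧ k ∈ pvUnityFields) := by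
    intro k hk hand
    obtain ⟨hff, hkU⟩ := hand
    obtain ⟨_, h2, h3⟩ := ho'mem k hk
    exact h3 (hu'of k hff hkU h2)
  have ha2nd : (u' ++ o').Nodup := by
    rw [ho'def]
    exact pvNodup_newOf Pd fo u' hu'nd
  have hr'mem : ∀ k ∈ r', k ∈ ks ∧ k ∉ u' ++ o' := by
    intro k hk
    obtain ⟨h1, _, h3⟩ := pvMem_newOf _ ks (u' ++ o') k hk
    exact ⟨h1, (pvContains_false_iff _ k).mp h3⟩
  have hr'notU : ∀ k ∈ r', ¬(uff = true ∧ k ∈ pvUnityFields) := by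
    intro k hk hand
    obtain ⟨hff, hkU⟩ := hand
    obtain ⟨h1, h3⟩ := hr'mem k hk
    exact h3 (List.mem_append_left _ (hu'of k hff hkU ((hPd k).mpr h1)))
  have hr'notFo : ∀ k ∈ r', k ∉ fo := by
    intro k hk hkfo
    obtain ⟨h1, h3⟩ := hr'mem k hk
    have hku : k ∉ u' := fun h => h3 (List.mem_append_left _ h)
    have hko : k ∈ o' := by
      rw [ho'def]
      exact pvMem_newOf_of Pd fo u' k hkfo ((hPd k).mpr h1) ((pvContains_false_iff u' k).mpr hku)
    exact h3 (List.mem_append_right _ hko)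
  have hKnd : ((u' ++ o') ++ r').Nodup := by
    rw [hr'def]
    exact pvNodup_newOf _ ks (u' ++ o') ha2nd
  have hmem : ∀ k, k ∈ (u' ++ o') ++ r' ↔ k ∈ ks := by
    intro k
    constructor
    · intro h
      rcases List.mem_append.mp h with h | h
      · rcases List.mem_append.mp h with h | h
        · exact (hPd k).mp (hu'mem k h).2.1
        · exact (hPd k).mp (ho'mem k h).2.1
      · exact (hr'mem k h).1
    · intro h
      by_cases ha : k ∈ u' ++ o'
      · exact List.mem_append_left _ ha
      · refine List.mem_append_right _ ?_
        rw [hr'def]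
        exact pvMem_newOf_of _ ks (u' ++ o') k h rfl ((pvContains_false_iff _ k).mpr ha)
  have hperm : ((u' ++ o') ++ r').Perm ks := (List.perm_ext_iff_of_nodup hKnd hn).mpr hmem
  have hRu : ∀ k ∈ u', pvRankB fields fo uff k = (List.idxOf k pvUnityFields : Int) := by
    intro k hk
    obtain ⟨h1, _, h3⟩ := hu'mem k hk
    rw [h3]
    exact pvRankB_eq1 fields fo k h1
  have hRo : ∀ k ∈ o', pvRankB fields fo uff k = (pvUnityFields.length : Int) + (List.idxOf k fo : Int) := by
    intro k hk
    exact pvRankB_eq2 fields fo uff k (ho'notU k hk) (ho'mem k hk).1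
  have hRr : ∀ k ∈ r', pvRankB fields fo uff k = (pvUnityFields.length : Int) + (fo.length : Int) + (List.idxOf k ks : Int) := by
    intro k hk
    exact pvRankB_eq3 fields fo uff k (hr'notU k hk) (hr'notFo k hk) (hr'mem k hk).1
  have hpw : ((u' ++ o') ++ r').Pairwise (fun x y => pvRankB fields fo uff x < pvRankB fields fo uff y) := by
    rw [List.pairwise_append, List.pairwise_append]
    refine ⟨⟨?_, ?_, ?_⟩, ?_, ?_⟩
    · refine hu'pair.imp_of_mem ?_
      intro a b ha hb hlt
      rw [hRu a ha, hRu b hb]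
      omega
    · refine (pvPairwise_newOf Pd fo u').imp_of_mem ?_
      intro a b ha hb hlt
      rw [hRo a ha, hRo b hb]
      omega
    · intro a ha b hb
      rw [hRu a ha, hRo b hb]
      have hbd := List.idxOf_lt_length_of_mem (hu'mem a ha).1
      omega
    · refine (pvPairwise_newOf _ ks (u' ++ o')).imp_of_mem ?_
      intro a b ha hb hlt
      rw [hRr a ha, hRr b hb]
      omega
    · intro a ha b hb
      rcases List.mem_append.mp ha with h | h
      · rw [hRu a h, hRr b hb]
        have hbd := List.idxOf_lt_length_of_mem (hu'mem a h).1
        omega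
      · rw [hRo a h, hRr b hb]
        have hbd := List.idxOf_lt_length_of_mem (ho'mem a h).1
        omega
  have hsorted : PySem.List.sorted ks (pvRankB fields fo uff) = (u' ++ o') ++ r' :=
    PySem.List.sorted_eq_of_perm_of_pairwise_lt ks _ _ hperm hpw
  rw [hsorted]
  rw [pvNewOf_true_all ((u' ++ o') ++ r') [] hKnd (fun k _ => rfl)]
  rw [List.nil_append, List.append_assoc]
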